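-- pv_equiv track=rewrite | github.com/aniketsahu28m/IS_LAB | LAB 1/Q3.py | prepare_plaintext
-- ===== SOURCE A (Python) =====
-- def prepare_plaintext(text):
--     text = text.upper().replace(' ', '').replace('J', 'I')
--
--     prepared_text = ""
--     i = 0
--     while i < len(text):
--         prepared_text += text[i]
--
--         if i == len(text) - 1:
--             prepared_text += 'X'
--             break
--
--         if text[i] == text[i + 1]:
--             prepared_text += 'X'
--             i += 1
--         else:
--             prepared_text += text[i + 1]
--             i += 2
--
--     return prepared_text
-- ===== SOURCE B (Python) =====
-- def prepare_plaintext(text):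
--     text = text.upper().replace(' ', '').replace('J', 'I')
--     parts = []
--     pending = None
--     for ch in text:
--         if pending is None:
--             pending = ch
--         elif pending == ch:
--             parts.append(pending + 'X')
--             pending = ch
--         else:
--             parts.append(pending + ch)
--             pending = None
--     if pending is not None:
--         parts.append(pending + 'X')
--     return ''.join(parts)
-- ===== Notes on version B (the rewrite author's own statement) =====
-- stated objective: faster
-- what changed: Replaces A's index-jumping while loop that grows the result by repeated string concatenation with a single for-each pass that keeps the unpaired character in a variable and appends each finished digraph to a list joined once at the end.
import Mathlib
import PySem

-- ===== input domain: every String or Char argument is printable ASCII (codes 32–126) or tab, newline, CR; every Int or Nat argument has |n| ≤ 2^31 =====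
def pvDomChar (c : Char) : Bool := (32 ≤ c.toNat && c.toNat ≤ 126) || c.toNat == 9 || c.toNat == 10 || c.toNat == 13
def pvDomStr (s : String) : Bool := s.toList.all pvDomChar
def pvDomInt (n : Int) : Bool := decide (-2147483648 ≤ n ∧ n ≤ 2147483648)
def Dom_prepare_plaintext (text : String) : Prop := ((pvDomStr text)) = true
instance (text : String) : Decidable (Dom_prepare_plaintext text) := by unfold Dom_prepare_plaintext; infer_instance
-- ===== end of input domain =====

-- B replaces A's index-jumping while loop (quadratic string appends) by a single
-- for-each pass with a 'pending' unpaired character and a list of digraphs joined once.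

-- ===== PORT A =====
-- A's while loop over indices, stepping by 1 on a doubled letter and by 2 otherwise,
-- transliterated as recursion over the remaining characters with the same accumulator.
def pvALoop (t : List Char) (acc : String) : String :=
  match t with
  | [] => acc
  | [c] => acc ++ c.toString ++ "X"
  | c :: d :: rest =>
    if c == d then pvALoop (d :: rest) (acc ++ c.toString ++ "X")
    else pvALoop rest (acc ++ c.toString ++ d.toString)

def prepare_plaintext (text : String) : String :=
  let text := PySem.Str.replace (PySem.Str.replace (PySem.Str.upper text) " " "") "J" "I"
  pvALoop text.toList ""

-- ===== PORT B =====
def pvBStep (st : List String × Option Char) (ch : Char) : List String × Option Char :=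
  match st.2 with
  | none => (st.1, some ch)
  | some p =>
    if p == ch then (st.1 ++ [p.toString ++ "X"], some ch)
    else (st.1 ++ [p.toString ++ ch.toString], none)

def prepare_plaintext_alt (text : String) : String :=
  let text := PySem.Str.replace (PySem.Str.replace (PySem.Str.upper text) " " "") "J" "I"
  let st := text.toList.foldl pvBStep ([], none)
  let parts := match st.2 with
    | some p => st.1 ++ [p.toString ++ "X"]
    | none => st.1
  PySem.Str.join "" parts

-- ===== PRECONDITION & SPEC =====
def Spec_prepare_plaintext (text : String) (out : String) : Prop := out = prepare_plaintext_alt text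
instance (text : String) (out : String) : Decidable (Spec_prepare_plaintext text out) := by unfold Spec_prepare_plaintext; infer_instance

-- ===== CLAIM (what is proved, stated in full; the proofs are below) =====
def Claim_equal_prepare_plaintext : Prop := ∀ (text : String), Dom_prepare_plaintext text → Spec_prepare_plaintext text (prepare_plaintext text)

-- ===== LEMMAS AND PROOFS =====

-- B's continuation: the output still to be produced from remaining input l and pending p.
def pvBGo (l : List Char) (p : Option Char) : String :=
  match l, p with
  | [], none => ""
  | [], some p => p.toString ++ "X"
  | c :: rest, none => pvBGo rest (some c)
  | c :: rest, some p =>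
    if p == c then p.toString ++ "X" ++ pvBGo rest (some c)
    else p.toString ++ c.toString ++ pvBGo rest none

theorem pvIntersperse_nil_flatten (l : List (List Char)) :
    (List.intersperse ([] : List Char) l).flatten = l.flatten := by
  induction l with
  | nil => rfl
  | cons a t ih => cases t <;> simp_all [List.intersperse]

theorem pvCharsJoin_nil (l : List (List Char)) :
    PySem.Chars.join [] l = l.flatten := by
  simp [PySem.Chars.join, List.intercalate, pvIntersperse_nil_flatten]

theorem pvBFold_eq (l : List Char) (acc : List String) (p : Option Char) :
    PySem.Str.join ""
      (match (l.foldl pvBStep (acc, p)).2 with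
       | some q => (l.foldl pvBStep (acc, p)).1 ++ [q.toString ++ "X"]
       | none => (l.foldl pvBStep (acc, p)).1)
    = PySem.Str.join "" acc ++ pvBGo l p := by
  induction l generalizing acc p with
  | nil =>
    cases p <;> (rw [← String.toList_inj]; simp [pvBGo, pvCharsJoin_nil])
  | cons c rest ih =>
    cases p with
    | none => simpa [pvBStep, pvBGo] using ih acc (some c)
    | some q =>
      cases hqc : q == c with
      | true =>
        simp only [List.foldl_cons, pvBStep, hqc, if_true]
        rw [ih, pvBGo]
        simp only [hqc, if_true]
        rw [← String.toList_inj]; simp [pvCharsJoin_nil]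
      | false =>
        simp only [List.foldl_cons, pvBStep, hqc, Bool.false_eq_true, if_false]
        rw [ih, pvBGo]
        simp only [hqc, Bool.false_eq_true, if_false]
        rw [← String.toList_inj]; simp [pvCharsJoin_nil]

theorem pvALoop_acc (t : List Char) (acc : String) :
    pvALoop t acc = acc ++ pvALoop t "" := by
  match t with
  | [] => simp [pvALoop]
  | [c] => rw [← String.toList_inj]; simp [pvALoop]
  | c :: d :: rest =>
    cases hcd : c == d with
    | true =>
      simp only [pvALoop, hcd, if_true]
      rw [pvALoop_acc (d :: rest) (acc ++ c.toString ++ "X"),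
          pvALoop_acc (d :: rest) ("" ++ c.toString ++ "X")]
      rw [← String.toList_inj]; simp
    | false =>
      simp only [pvALoop, hcd, Bool.false_eq_true, if_false]
      rw [pvALoop_acc rest (acc ++ c.toString ++ d.toString),
          pvALoop_acc rest ("" ++ c.toString ++ d.toString)]
      rw [← String.toList_inj]; simp
termination_by t.length

theorem pvALoop_eq_pvBGo (l : List Char) : pvALoop l "" = pvBGo l none := by
  match l with
  | [] => simp [pvALoop, pvBGo]
  | [c] => rw [← String.toList_inj]; simp [pvALoop, pvBGo]
  | c :: d :: rest =>
    cases hcd : c == d with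
    | true =>
      simp only [pvALoop, hcd, if_true]
      rw [pvALoop_acc (d :: rest), pvALoop_eq_pvBGo (d :: rest)]
      show _ = pvBGo (d :: rest) (some c)
      rw [← String.toList_inj]
      simp [pvBGo, hcd]
    | false =>
      simp only [pvALoop, hcd, Bool.false_eq_true, if_false]
      rw [pvALoop_acc rest, pvALoop_eq_pvBGo rest]
      show _ = pvBGo (d :: rest) (some c)
      rw [← String.toList_inj]
      simp [pvBGo, hcd]
termination_by l.length

-- ===== VERDICT (by name: the statement is the Claim_ definition above) =====
theorem prepare_plaintext_spec : Claim_equal_prepare_plaintext := by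
  intro text _
  unfold Spec_prepare_plaintext prepare_plaintext prepare_plaintext_alt
  rw [pvALoop_eq_pvBGo]
  rw [pvBFold_eq]
  rw [← String.toList_inj]; simp
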